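-- pv_equiv track=rewrite | github.com/opensecurityarchitecture/osa-data | scripts/generate-sp045-svg.py | fix_amp_in_text
-- ===== SOURCE A (Python) =====
-- def fix_amp_in_text(svg_text):
--     # Replace & in XML text content (between > and <) that are not already &amp;
--     result = []
--     i = 0
--     while i < len(svg_text):
--         if svg_text[i] == '&':
--             # Check context: are we in a text node (not an attribute, not already escaped)?
--             # Simple heuristic: replace & not followed by amp; lt; gt; # apos; quot;
--             rest = svg_text[i:]
--             if not any(rest.startswith(e) for e in ['&amp;','&lt;','&gt;','&#','&quot;','&apos;']):
--                 result.append('&amp;')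
--             else:
--                 result.append('&')
--         elif svg_text[i:i+4] == '<!--':
--             # Skip comment content - replace & with &amp; inside comments too
--             end = svg_text.find('-->', i)
--             if end == -1:
--                 result.append(svg_text[i:])
--                 break
--             comment = svg_text[i:end+3].replace('&', '&amp;').replace('&amp;amp;', '&amp;')
--             result.append(comment)
--             i = end + 3
--             continue
--         else:
--             result.append(svg_text[i])
--         i += 1
--     return ''.join(result)
-- ===== SOURCE B (Python) =====
-- import re
--
-- _AMP_RE = re.compile(r'&(?!amp;|lt;|gt;|#|quot;|apos;)')
--
-- def _escape(chunk):
--     return _AMP_RE.sub('&amp;', chunk)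
--
-- def _escape_comment(comment):
--     return comment.replace('&', '&amp;').replace('&amp;amp;', '&amp;')
--
-- def fix_amp_in_text(svg_text):
--     pieces = []
--     pos = 0
--     while True:
--         start = svg_text.find('<!--', pos)
--         if start == -1:
--             pieces.append(_escape(svg_text[pos:]))
--             break
--         pieces.append(_escape(svg_text[pos:start]))
--         close = svg_text.find('-->', start)
--         if close == -1:
--             pieces.append(svg_text[start:])
--             break
--         pieces.append(_escape_comment(svg_text[start:close + 3]))
--         pos = close + 3
--     return ''.join(pieces)
-- ===== Notes on version B (the rewrite author's own statement) =====
-- stated objective: faster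
-- what changed: Replaced A's character-by-character Python scan (per-character entity lookahead and inline comment handling) by region segmentation: str.find splits the text into comment and non-comment regions, a precompiled regex with a negative lookahead bulk-escapes each non-comment region, and the same replace-chain handles each comment region.
import Mathlib
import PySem

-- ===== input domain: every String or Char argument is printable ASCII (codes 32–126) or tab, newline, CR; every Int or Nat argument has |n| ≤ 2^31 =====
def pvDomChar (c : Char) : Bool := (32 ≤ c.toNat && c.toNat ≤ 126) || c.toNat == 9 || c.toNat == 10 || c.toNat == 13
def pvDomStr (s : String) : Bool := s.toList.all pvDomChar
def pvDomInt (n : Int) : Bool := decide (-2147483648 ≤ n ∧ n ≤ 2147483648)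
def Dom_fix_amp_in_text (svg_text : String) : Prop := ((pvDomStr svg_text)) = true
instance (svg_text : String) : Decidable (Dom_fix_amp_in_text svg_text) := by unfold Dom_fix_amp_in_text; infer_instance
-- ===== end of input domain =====

-- B replaces A's character-by-character state machine by region segmentation (find-based
-- comment splitting) plus bulk regex-style substitution on each region (measured faster in a timing run).

-- ===== PORT A =====
-- the entity prefixes A tests with rest.startswith(e)
def pvEntsA : List (List Char) :=
  [['&','a','m','p',';'], ['&','l','t',';'], ['&','g','t',';'], ['&','#'],
   ['&','q','u','o','t',';'], ['&','a','p','o','s',';']]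

-- A's while loop over index i, as structural recursion on the suffix svg_text[i:];
-- each recursive step appends the piece A appends and advances i the same way.
def pvLoopA : List Char → List (List Char)
  | [] => []
  | c :: tl =>
    if c = '&' then
      if !(pvEntsA.any (fun e => PySem.Chars.startswith (c :: tl) e)) then
        ['&','a','m','p',';'] :: pvLoopA tl
      else
        ['&'] :: pvLoopA tl
    else if (c :: tl).take 4 = ['<','!','-','-'] then
      let f := PySem.Chars.find (c :: tl) ['-','-','>']
      if f = -1 then [c :: tl]
      else
        PySem.Chars.replace
          (PySem.Chars.replace ((c :: tl).take (f.toNat + 3)) ['&'] ['&','a','m','p',';'])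
          ['&','a','m','p',';','a','m','p',';'] ['&','a','m','p',';']
          :: pvLoopA ((c :: tl).drop (f.toNat + 3))
    else
      [c] :: pvLoopA tl
  termination_by cs => cs.length
  decreasing_by all_goals (simp; try omega)

def fix_amp_in_text (svg_text : String) : String :=
  String.ofList (pvLoopA svg_text.toList).flatten

-- ===== PORT B =====
-- the regex negative-lookahead alternatives of r'&(?!amp;|lt;|gt;|#|quot;|apos;)'
def pvLook : List (List Char) :=
  [['a','m','p',';'], ['l','t',';'], ['g','t',';'], ['#'],
   ['q','u','o','t',';'], ['a','p','o','s',';']]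

-- re.sub(r'&(?!amp;|lt;|gt;|#|quot;|apos;)', '&amp;', chunk): all matches have length 1,
-- so the left-to-right scan is this recursion (ported by hand; exact for this pattern)
def pvEscape : List Char → List Char
  | [] => []
  | c :: tl =>
    if c = '&' ∧ !(pvLook.any (fun p => PySem.Chars.startswith tl p)) then
      ['&','a','m','p',';'] ++ pvEscape tl
    else
      c :: pvEscape tl

def pvCommentEsc (cs : List Char) : List Char :=
  PySem.Chars.replace (PySem.Chars.replace cs ['&'] ['&','a','m','p',';'])
    ['&','a','m','p',';','a','m','p',';'] ['&','a','m','p',';']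

-- B's while loop over pos, as recursion on the suffix svg_text[pos:]
def pvLoopB (cs : List Char) : List (List Char) :=
  let st := PySem.Chars.find cs ['<','!','-','-']
  if hst : st = -1 then [pvEscape cs]
  else
    let v := cs.drop st.toNat
    let cl := PySem.Chars.find v ['-','-','>']
    if hcl : cl = -1 then [pvEscape (cs.take st.toNat), v]
    else
      pvEscape (cs.take st.toNat) :: pvCommentEsc (v.take (cl.toNat + 3))
        :: pvLoopB (v.drop (cl.toNat + 3))
  termination_by cs.length
  decreasing_by
    have h0 : (-1:Int) ≤ st := PySem.Chars.neg_one_le_find cs ['<','!','-','-']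
    have h0' : (-1:Int) ≤ cl := PySem.Chars.neg_one_le_find v ['-','-','>']
    have h1 : ['<','!','-','-'] <+: cs.drop st.toNat :=
      (PySem.Chars.find_spec (by omega : (0:Int) ≤ st)).1
    have h2 := h1.length_le
    simp at h2 ⊢
    omega

def fix_amp_in_text_alt (svg_text : String) : String :=
  String.ofList (pvLoopB svg_text.toList).flatten

-- ===== PRECONDITION & SPEC =====
def Spec_fix_amp_in_text (svg_text : String) (out : String) : Prop := out = fix_amp_in_text_alt svg_text
instance (svg_text : String) (out : String) : Decidable (Spec_fix_amp_in_text svg_text out) := by unfold Spec_fix_amp_in_text; infer_instance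

-- ===== CLAIM (what is proved, stated in full; the proofs are below) =====
def Claim_equal_fix_amp_in_text : Prop := ∀ (svg_text : String), Dom_fix_amp_in_text svg_text → Spec_fix_amp_in_text svg_text (fix_amp_in_text svg_text)

-- ===== LEMMAS AND PROOFS =====

theorem pv_sw_cons (c : Char) (s p : List Char) :
    PySem.Chars.startswith (c :: s) (c :: p) = PySem.Chars.startswith s p := by
  rw [Bool.eq_iff_iff, PySem.Chars.startswith_iff, PySem.Chars.startswith_iff,
    List.cons_prefix_cons]
  simp

-- A's entity test on '&'::tl is exactly B's lookahead test on tl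
theorem pv_ents_eq_look (tl : List Char) :
    pvEntsA.any (fun e => PySem.Chars.startswith ('&' :: tl) e)
      = pvLook.any (fun p => PySem.Chars.startswith tl p) := by
  simp only [pvEntsA, pvLook, List.any_cons, List.any_nil, pv_sw_cons]

-- a lookahead alternative never contains '<', so the test is blind to a following
-- comment opener (or end of string)
theorem pv_sw_append (p u v : List Char) (hp : '<' ∉ p)
    (hv : v = [] ∨ v.head? = some '<') :
    PySem.Chars.startswith (u ++ v) p = PySem.Chars.startswith u p := by
  rw [Bool.eq_iff_iff, PySem.Chars.startswith_iff, PySem.Chars.startswith_iff]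
  constructor
  · intro h
    by_cases hle : p.length ≤ u.length
    · have ht : p = (u ++ v).take p.length := List.prefix_iff_eq_take.1 h
      rw [List.take_append_of_le_length hle] at ht
      exact ht ▸ List.take_prefix _ u
    · exfalso
      have hup : u <+: p :=
        List.prefix_of_prefix_length_le (List.prefix_append u v) h (by omega)
      rcases hv with h0 | h0
      · have := h.length_le
        simp [h0] at this
        omega
      · obtain ⟨v', rfl⟩ : ∃ v', v = '<' :: v' := by
          cases v with
          | nil => simp at h0
          | cons a t => simp at h0; exact ⟨t, by rw [h0]⟩
        apply hp
        have hlt : u.length < p.length := by omega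
        have hlen : u.length < (u ++ ('<' :: v')).length := by simp
        have h1 : p[u.length] = (u ++ ('<' :: v'))[u.length] := h.getElem hlt
        have h2 : (u ++ ('<' :: v'))[u.length] = '<' := by
          rw [List.getElem_append_right (Nat.le_refl _)]
          simp
        rw [h2] at h1
        exact h1 ▸ List.getElem_mem hlt
  · exact fun h => h.trans (List.prefix_append u v)

theorem pv_look_append (u v : List Char) (hv : v = [] ∨ v.head? = some '<') :
    pvLook.any (fun p => PySem.Chars.startswith (u ++ v) p)
      = pvLook.any (fun p => PySem.Chars.startswith u p) := by
  simp only [pvLook, List.any_cons, List.any_nil]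
  rw [pv_sw_append ['a','m','p',';'] u v (by decide) hv,
    pv_sw_append ['l','t',';'] u v (by decide) hv,
    pv_sw_append ['g','t',';'] u v (by decide) hv,
    pv_sw_append ['#'] u v (by decide) hv,
    pv_sw_append ['q','u','o','t',';'] u v (by decide) hv,
    pv_sw_append ['a','p','o','s',';'] u v (by decide) hv]

-- on a comment-free chunk u (followed by nothing or a comment opener) A's scan is B's escape
theorem pv_chunk (u v : List Char)
    (hnc : ∀ i < u.length, ¬ (['<','!','-','-'] <+: (u ++ v).drop i))
    (hv : v = [] ∨ v.head? = some '<') :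
    (pvLoopA (u ++ v)).flatten = pvEscape u ++ (pvLoopA v).flatten := by
  induction u with
  | nil => simp [pvEscape]
  | cons c u' ih =>
    have hnc0 : ¬ (['<','!','-','-'] <+: (c :: (u' ++ v))) := by
      have := hnc 0 (by simp)
      simpa using this
    have hnc' : ∀ i < u'.length, ¬ (['<','!','-','-'] <+: (u' ++ v).drop i) := by
      intro i hi
      have := hnc (i + 1) (by simp; omega)
      simpa using this
    rw [List.cons_append]
    by_cases hc : c = '&'
    · subst hc
      rw [pvLoopA, pvEscape]
      rw [pv_ents_eq_look, pv_look_append u' v hv]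
      by_cases hb : pvLook.any (fun p => PySem.Chars.startswith u' p)
      · simp [hb, ih hnc']
      · simp [hb, ih hnc']
    · have htake : ¬ ((c :: (u' ++ v)).take 4 = ['<','!','-','-']) := fun h =>
        hnc0 (h ▸ List.take_prefix 4 (c :: (u' ++ v)))
      rw [pvLoopA, pvEscape]
      simp at htake
      have hcond : ¬(c = '<' ∧ List.take 3 (u' ++ v) = ['!','-','-']) :=
        fun h => htake h.1 h.2
      simp [hc, hcond, ih hnc']

-- one step of A's scan at a comment opener
theorem pv_loopA_comment (w : List Char) :
    pvLoopA ('<'::'!'::'-'::'-'::w) =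
      (let v := '<'::'!'::'-'::'-'::w
      let f := PySem.Chars.find v ['-','-','>']
      if f = -1 then [v]
      else pvCommentEsc (v.take (f.toNat + 3)) :: pvLoopA (v.drop (f.toNat + 3))) := by
  rw [pvLoopA]
  simp [pvCommentEsc]

theorem pv_flat_eq (cs : List Char) : (pvLoopA cs).flatten = (pvLoopB cs).flatten := by
  by_cases hst : PySem.Chars.find cs ['<','!','-','-'] = -1
  · have hninf : ¬ (['<','!','-','-'] <:+: cs) :=
      (PySem.Chars.find_eq_neg_one_iff cs ['<','!','-','-']).1 hst
    have hnc : ∀ i < cs.length, ¬ (['<','!','-','-'] <+: (cs ++ ([]:List Char)).drop i) := by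
      intro i hi hpre
      rw [List.append_nil] at hpre
      exact hninf ((PySem.Chars.isIn_iff_infix _ _).1
        ((PySem.Chars.exists_prefix_drop_iff_isIn _ _).1 ⟨i, hpre⟩))
    have hch := pv_chunk cs [] hnc (Or.inl rfl)
    rw [List.append_nil] at hch
    rw [pvLoopB]
    simp only [hst]
    simp [hch, pvLoopA]
  · have hm1 : (-1:Int) ≤ PySem.Chars.find cs ['<','!','-','-'] :=
      PySem.Chars.neg_one_le_find cs ['<','!','-','-']
    have h0 : (0:Int) ≤ PySem.Chars.find cs ['<','!','-','-'] := by omega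
    obtain ⟨hpre, hmin⟩ := PySem.Chars.find_spec h0
    have hle : PySem.Chars.find cs ['<','!','-','-'] ≤ cs.length :=
      PySem.Chars.find_le_length cs ['<','!','-','-']
    set n := (PySem.Chars.find cs ['<','!','-','-']).toNat with hn
    have hnle : n ≤ cs.length := by omega
    obtain ⟨w, hw⟩ := hpre
    have hwcons : cs.drop n = '<'::'!'::'-'::'-'::w := by rw [← hw]; rfl
    have hwlen : cs.length - n = w.length + 4 := by
      have := congrArg List.length hwcons
      simpa using this
    have hnc : ∀ i < (cs.take n).length,
        ¬ (['<','!','-','-'] <+: (cs.take n ++ cs.drop n).drop i) := by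
      intro i hi
      rw [List.take_append_drop]
      exact hmin i (by simpa [hnle] using hi)
    have hv : cs.drop n = [] ∨ (cs.drop n).head? = some '<' :=
      Or.inr (by rw [hwcons]; rfl)
    have hch := pv_chunk (cs.take n) (cs.drop n) hnc hv
    rw [List.take_append_drop] at hch
    rw [hch, hwcons, pv_loopA_comment]
    rw [pvLoopB]
    simp only [hst, reduceDIte, ← hn, hwcons]
    by_cases hcl : PySem.Chars.find ('<'::'!'::'-'::'-'::w) ['-','-','>'] = -1
    · simp [hcl]
    · have hrec := pv_flat_eq (('<'::'!'::'-'::'-'::w).drop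
        ((PySem.Chars.find ('<'::'!'::'-'::'-'::w) ['-','-','>']).toNat + 3))
      simp at hrec
      simp [hcl, hrec]
  termination_by cs.length
  decreasing_by
    simp only [List.length_drop, List.length_cons]
    omega

-- ===== VERDICT (by name: the statement is the Claim_ definition above) =====
theorem fix_amp_in_text_spec : Claim_equal_fix_amp_in_text := by
  intro s _
  unfold Spec_fix_amp_in_text fix_amp_in_text fix_amp_in_text_alt
  rw [pv_flat_eq]
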